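-- pv_equiv track=rewrite | github.com/yarmash/codejam | 2018/Qualification/saving_the_universe_again.py | calc_damage
-- ===== SOURCE A (Python) =====
-- def calc_damage(s):
--     damage = 0
--     strength = 1
--
--     for x in s:
--         if x == 'S':
--             damage += strength
--         else:
--             strength *= 2
--
--     return damage
-- ===== SOURCE B (Python) =====
-- def calc_damage(s):
--     # Group-based reformulation: replace every non-'S' char by a single
--     # delimiter and split into segments; segment i sits after i doublings,
--     # so it contributes len(segment) * weight, weight doubling per segment.
--     parts = ''.join(c if c == 'S' else '|' for c in s).split('|')
--     total = 0
--     weight = 1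
--     for p in parts:
--         total += len(p) * weight
--         weight *= 2
--     return total
-- ===== Notes on version B (the rewrite author's own statement) =====
-- stated objective: alternative
-- what changed: Replaces A's single accumulating scan with damage/strength state by a group decomposition: map every charge character to a delimiter, split the string into shot segments, and sum segment-length times a per-segment doubling weight.
import Mathlib
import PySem

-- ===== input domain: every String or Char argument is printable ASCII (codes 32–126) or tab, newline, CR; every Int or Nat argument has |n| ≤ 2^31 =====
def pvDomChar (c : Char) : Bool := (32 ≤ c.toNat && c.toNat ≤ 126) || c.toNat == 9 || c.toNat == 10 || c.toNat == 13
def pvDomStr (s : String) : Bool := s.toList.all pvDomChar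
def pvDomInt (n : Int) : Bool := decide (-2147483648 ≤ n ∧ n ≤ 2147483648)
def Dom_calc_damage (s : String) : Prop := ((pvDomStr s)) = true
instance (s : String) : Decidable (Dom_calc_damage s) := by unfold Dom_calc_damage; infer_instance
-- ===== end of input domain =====

-- B replaces A's accumulating damage/strength scan by a group decomposition
-- (split at charge characters, sum segment-length times a doubling weight); alternative, same cost.


-- ===== PORT A =====
def calc_damage (s : String) : Int :=
  (s.toList.foldl
    (fun (p : Int × Int) x => if x = 'S' then (p.1 + p.2, p.2) else (p.1, p.2 * 2))
    (0, 1)).1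

-- ===== PORT B =====
def calc_damage_alt (s : String) : Int :=
  let parts := PySem.Chars.splitOn (s.toList.map (fun c => if c = 'S' then c else '|')) ['|']
  (parts.foldl (fun (p : Int × Int) q => (p.1 + (q.length : Int) * p.2, p.2 * 2)) (0, 1)).1

-- ===== PRECONDITION & SPEC =====
def Spec_calc_damage (s : String) (out : Int) : Prop := out = calc_damage_alt s
instance (s : String) (out : Int) : Decidable (Spec_calc_damage s out) := by unfold Spec_calc_damage; infer_instance

-- ===== CLAIM (what is proved, stated in full; the proofs are below) =====
def Claim_equal_calc_damage : Prop := ∀ (s : String), Dom_calc_damage s → Spec_calc_damage s (calc_damage s)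

-- ===== LEMMAS AND PROOFS =====

/-- Damage of a char list, normalised to strength 1. -/
def pvCore : List Char → Int
  | [] => 0
  | c :: r => if c = 'S' then 1 + pvCore r else 2 * pvCore r

/-- A's loop computes `d + k * pvCore xs` in its first component. -/
theorem pvA_fold (xs : List Char) : ∀ (d k : Int),
    (xs.foldl
      (fun (p : Int × Int) x => if x = 'S' then (p.1 + p.2, p.2) else (p.1, p.2 * 2))
      (d, k)).1 = d + k * pvCore xs := by
  induction xs with
  | nil => intro d k; simp [pvCore]
  | cons c r ih =>
    intro d k
    by_cases h : c = 'S' <;> simp [pvCore, h, ih] <;> ring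

/-- Pure recursion computing `splitOn xs ['|']` (single-char separator). -/
def pvSplit : List Char → List (List Char)
  | [] => [[]]
  | c :: r =>
    if c = '|' then [] :: pvSplit r
    else match pvSplit r with
      | [] => [[c]]
      | h :: t => (c :: h) :: t

theorem pvSplit_ne_nil (xs : List Char) : pvSplit xs ≠ [] := by
  cases xs with
  | nil => simp [pvSplit]
  | cons c r =>
    simp only [pvSplit]
    split
    · simp
    · split <;> simp

theorem pvGo_nil (f : Nat) (cur : List Char) (acc : List (List Char)) :
    PySem.Chars.splitOn.go ['|'] f [] cur acc = acc.reverse ++ [cur.reverse] := by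
  cases f <;> rw [PySem.Chars.splitOn.go] <;> simp

theorem pvGo_sep (f : Nat) (rest cur : List Char) (acc : List (List Char)) :
    PySem.Chars.splitOn.go ['|'] (f + 1) ('|' :: rest) cur acc =
      PySem.Chars.splitOn.go ['|'] f rest [] (cur.reverse :: acc) := by
  rw [PySem.Chars.splitOn.go]
  simp [List.isPrefixOf]

theorem pvGo_keep (f : Nat) (c : Char) (rest cur : List Char) (acc : List (List Char))
    (h : c ≠ '|') :
    PySem.Chars.splitOn.go ['|'] (f + 1) (c :: rest) cur acc =
      PySem.Chars.splitOn.go ['|'] f rest (c :: cur) acc := by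
  rw [PySem.Chars.splitOn.go]
  simp [List.isPrefixOf]
  intro hh
  exact absurd hh.symm h

theorem pvGo_spec (xs : List Char) : ∀ (fuel : Nat) (cur : List Char) (acc : List (List Char)),
    xs.length ≤ fuel →
    PySem.Chars.splitOn.go ['|'] fuel xs cur acc =
      acc.reverse ++ (match pvSplit xs with
        | [] => [cur.reverse]
        | h :: t => (cur.reverse ++ h) :: t) := by
  induction xs with
  | nil => intro fuel cur acc _; simp [pvGo_nil, pvSplit]
  | cons c r ih =>
    intro fuel cur acc hle
    cases fuel with
    | zero => simp at hle
    | succ f =>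
      have hr : r.length ≤ f := by simpa using hle
      by_cases hc : c = '|'
      · subst hc
        rw [pvGo_sep, ih f [] (cur.reverse :: acc) hr]
        cases hs : pvSplit r with
        | nil => exact absurd hs (pvSplit_ne_nil r)
        | cons h t => simp [pvSplit, hs]
      · rw [pvGo_keep f c r cur acc hc, ih f (c :: cur) acc hr]
        cases hs : pvSplit r with
        | nil => exact absurd hs (pvSplit_ne_nil r)
        | cons h t => simp [pvSplit, hs, hc]

theorem pvSplitOn_eq (xs : List Char) : PySem.Chars.splitOn xs ['|'] = pvSplit xs := by
  rw [PySem.Chars.splitOn, pvGo_spec xs (xs.length + 1) [] [] (by omega)]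
  cases hs : pvSplit xs with
  | nil => exact absurd hs (pvSplit_ne_nil xs)
  | cons h t => simp

/-- Value of a segment list, normalised to weight 1. -/
def pvVal : List (List Char) -> Int
  | [] => 0
  | p :: ps => (p.length : Int) + 2 * pvVal ps

/-- B's loop computes `t + w * pvVal parts` in its first component. -/
theorem pvB_fold (parts : List (List Char)) : forall (t w : Int),
    (parts.foldl (fun (p : Int × Int) q => (p.1 + (q.length : Int) * p.2, p.2 * 2)) (t, w)).1
      = t + w * pvVal parts := by
  induction parts with
  | nil => intro t w; simp [pvVal]
  | cons p ps ih =>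
    intro t w
    simp [pvVal, ih]
    ring

theorem pvB_core (xs : List Char) :
    pvVal (pvSplit (xs.map (fun c => if c = 'S' then c else '|'))) = pvCore xs := by
  induction xs with
  | nil => simp [pvSplit, pvVal, pvCore]
  | cons c r ih =>
    by_cases hc : c = 'S'
    · subst hc
      cases hs : pvSplit (r.map (fun c => if c = 'S' then c else '|')) with
      | nil => exact absurd hs (pvSplit_ne_nil _)
      | cons h t =>
        rw [hs, pvVal] at ih
        simp only [List.map_cons, pvSplit, hs]
        rw [if_neg (by decide), pvVal, pvCore, if_pos rfl, <- ih]
        simp [List.length_cons]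
        ring
    · simp only [List.map_cons, if_neg hc, pvSplit, if_true]
      rw [pvVal, pvCore, if_neg hc, ih]
      simp

-- ===== VERDICT (by name: the statement is the Claim_ definition above) =====
theorem calc_damage_spec : Claim_equal_calc_damage := by
  intro s _
  unfold Spec_calc_damage calc_damage calc_damage_alt
  rw [pvA_fold, pvSplitOn_eq, pvB_fold, pvB_core]
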